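-- pv_equiv track=rewrite | github.com/maantano/CT | ver1/pro04.py | sayit
-- ===== SOURCE A (Python) =====
-- from itertools import permutations
--
-- def sayit(babbling):
--     can = ["aya", "ye", "woo", "ma"]
--     answer = 0
--     word = []
--     for i in range(1,len(can)+1):
--         for j in permutations(can,i):
--             word.append(''.join(j))
--     for i in babbling:
--         if i in word:
--             answer +=1
--     return answer
-- ===== SOURCE B (Python) =====
-- def sayit(babbling):
--     sounds = ["aya", "ye", "woo", "ma"]
--
--     def parse(s, avail):
--         if s == "":
--             return True
--         for w in avail:
--             if s.startswith(w):
--                 return parse(s[len(w):], [x for x in avail if x != w])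
--         return False
--
--     return sum(1 for word in babbling if word != "" and parse(word, sounds))
-- ===== Notes on version B (the rewrite author's own statement) =====
-- stated objective: alternative
-- what changed: B never builds the 64-entry permutation table: it greedily parses each word into distinct unused sounds (no sound is a prefix of another, so parsing is deterministic) and counts the words that are fully consumed.
import Mathlib
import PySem

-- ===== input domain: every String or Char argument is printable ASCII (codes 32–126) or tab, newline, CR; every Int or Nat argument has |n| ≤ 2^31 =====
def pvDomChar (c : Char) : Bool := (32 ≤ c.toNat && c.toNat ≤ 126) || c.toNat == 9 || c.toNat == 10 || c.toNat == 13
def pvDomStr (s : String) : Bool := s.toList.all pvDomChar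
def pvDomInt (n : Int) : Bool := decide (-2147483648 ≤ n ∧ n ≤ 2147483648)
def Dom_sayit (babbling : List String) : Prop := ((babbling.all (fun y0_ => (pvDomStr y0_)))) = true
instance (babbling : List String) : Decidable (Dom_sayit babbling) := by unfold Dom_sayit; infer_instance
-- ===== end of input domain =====

-- B greedily parses each word into distinct unused sounds instead of building A's 64-entry permutation table (objective: alternative decomposition).

-- ===== PORT A =====
-- itertools.permutations(l, k) in its emission order: pick each element in list order, recurse on the rest
def pvPerms (l : List String) (k : Nat) : List (List String) :=
  match k with
  | 0 => [[]]
  | k+1 => l.flatMap (fun x => (pvPerms (l.erase x) k).map (fun t => x :: t))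

def pvCanA : List String := ["aya", "ye", "woo", "ma"]

-- the list `word` A builds before the counting loop
def pvWordA : List String :=
  (PySem.List.pyRange 1 ((pvCanA.length : Int) + 1) 1).foldl
    (fun acc i => acc ++ (pvPerms pvCanA i.toNat).map (fun j => String.join j)) []

def sayit (babbling : List String) : Int :=
  babbling.foldl (fun answer i => if pvWordA.contains i = true then answer + 1 else answer) 0

-- ===== PORT B =====
def pvSounds : List String := ["aya", "ye", "woo", "ma"]

-- Source B's recursive parse; the fuel argument only makes the recursion structural
-- (avail shrinks at every call, so fuel pvSounds.length + 1 is never exhausted)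
def pvParse (fuel : Nat) (s : List Char) (avail : List String) : Bool :=
  match fuel with
  | 0 => false
  | fuel+1 =>
    if s = [] then true
    else
      match avail.find? (fun w => w.toList.isPrefixOf s) with
      | none => false
      | some w => pvParse fuel (s.drop w.toList.length) (avail.filter (fun x => x ≠ w))

def sayit_alt (babbling : List String) : Int :=
  babbling.foldl
    (fun acc word =>
      if word ≠ "" ∧ pvParse (pvSounds.length + 1) word.toList pvSounds = true then acc + 1 else acc) 0

-- ===== PRECONDITION & SPEC =====
def Spec_sayit (babbling : List String) (out : Int) : Prop := out = sayit_alt babbling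
instance (babbling : List String) (out : Int) : Decidable (Spec_sayit babbling out) := by unfold Spec_sayit; infer_instance

-- ===== CLAIM (what is proved, stated in full; the proofs are below) =====
def Claim_equal_sayit : Prop := ∀ (babbling : List String), Dom_sayit babbling → Spec_sayit babbling (sayit babbling)

-- ===== LEMMAS AND PROOFS =====

-- all strings parsable from `avail` within `fuel` steps (proof-only overapproximation)
def pvExps : Nat → List String → List (List Char)
  | 0, _ => []
  | fuel+1, avail =>
    [] :: avail.flatMap (fun w => (pvExps fuel (avail.filter (fun x => x ≠ w))).map (fun t => w.toList ++ t))

theorem pvParse_mem_exps : ∀ (fuel : Nat) (s : List Char) (avail : List String),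
    pvParse fuel s avail = true → s ∈ pvExps fuel avail := by
  intro fuel
  induction fuel with
  | zero => intro s avail h; simp [pvParse] at h
  | succ n ih =>
    intro s avail h
    by_cases hs : s = []
    · subst hs; simp [pvExps]
    · simp only [pvParse, if_neg hs] at h
      cases hfind : avail.find? (fun w => w.toList.isPrefixOf s) with
      | none => rw [hfind] at h; simp at h
      | some w =>
        rw [hfind] at h
        have hw : w ∈ avail := List.mem_of_find?_eq_some hfind
        have hpre : w.toList.isPrefixOf s = true := (List.find?_eq_some_iff_append.mp hfind).1
        have hpre' : w.toList <+: s := List.isPrefixOf_iff_prefix.mp hpre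
        have hsplit : w.toList ++ s.drop w.toList.length = s := List.prefix_iff_eq_append.mp hpre'
        have hmem := ih _ _ h
        simp only [pvExps, List.mem_cons, List.mem_flatMap, List.mem_map]
        right
        exact ⟨w, hw, _, hmem, hsplit⟩

-- every parsable nonempty word is in A's table (finite check)
theorem pvExps_in_wordA : ∀ t ∈ pvExps (pvSounds.length + 1) pvSounds,
    t = [] ∨ pvWordA.contains (String.ofList t) = true := by decide

-- every word of A's table is nonempty and parsable (finite check)
theorem pvWordA_parses : ∀ s ∈ pvWordA,
    s.toList ≠ [] ∧ pvParse (pvSounds.length + 1) s.toList pvSounds = true := by decide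

theorem pv_contains_iff_parse (s : String) :
    pvWordA.contains s = true ↔ (s ≠ "" ∧ pvParse (pvSounds.length + 1) s.toList pvSounds = true) := by
  constructor
  · intro hc
    have hmem : s ∈ pvWordA := by simpa using hc
    obtain ⟨h1, h2⟩ := pvWordA_parses s hmem
    refine ⟨?_, h2⟩
    intro he; subst he; exact h1 rfl
  · rintro ⟨h1, h2⟩
    have hmem := pvParse_mem_exps _ _ _ h2
    rcases pvExps_in_wordA _ hmem with h | h
    · exact absurd (by rw [← String.ofList_toList (s := s), h]) h1
    · rw [String.ofList_toList] at h
      simpa using h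

theorem pv_foldl_eq (babbling : List String) (a : Int) :
    babbling.foldl (fun answer i => if pvWordA.contains i = true then answer + 1 else answer) a =
    babbling.foldl
      (fun acc word =>
        if word ≠ "" ∧ pvParse (pvSounds.length + 1) word.toList pvSounds = true then acc + 1 else acc) a := by
  induction babbling generalizing a with
  | nil => rfl
  | cons x xs ih =>
    simp only [List.foldl_cons]
    rw [if_congr (pv_contains_iff_parse x) rfl rfl]
    exact ih _

-- ===== VERDICT (by name: the statement is the Claim_ definition above) =====
theorem sayit_spec : Claim_equal_sayit := by
  intro babbling _
  unfold Spec_sayit sayit sayit_alt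
  exact pv_foldl_eq babbling 0
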